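-- pv_equiv track=rewrite | github.com/KoshikawaShinya/atcoder | ABC218/c.py | remov
-- ===== SOURCE A (Python) =====
-- def remov(a):
--     f = False
--     ind = 0
--     for i, x in enumerate(a):
--         if '#' in x:
--             ind = i
--             break
--     a = a[ind:]
--     a = a[::-1]
--     for i, x in enumerate(a):
--         if '#' in x:
--             ind = i
--             break
--     a = a[ind:]
--     return a
-- ===== SOURCE B (Python) =====
-- def remov(a):
--     # single forward pass: grow the kept block with an extend/append buffer, reverse once at the end
--     seen = False
--     kept = []
--     buf = []
--     for x in a:
--         if '#' in x:
--             kept.extend(buf)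
--             kept.append(x)
--             buf = []
--             seen = True
--         elif seen:
--             buf.append(x)
--     return kept[::-1] if seen else a[::-1]
-- ===== Notes on version B (the rewrite author's own statement) =====
-- stated objective: alternative
-- what changed: B replaces A's slice/reverse/rescan/slice pipeline by one forward pass that accumulates the kept block (extend-with-buffer on each '#' row) and reverses once at the end; rows after the last '#' stay in the discarded buffer.
import Mathlib
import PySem

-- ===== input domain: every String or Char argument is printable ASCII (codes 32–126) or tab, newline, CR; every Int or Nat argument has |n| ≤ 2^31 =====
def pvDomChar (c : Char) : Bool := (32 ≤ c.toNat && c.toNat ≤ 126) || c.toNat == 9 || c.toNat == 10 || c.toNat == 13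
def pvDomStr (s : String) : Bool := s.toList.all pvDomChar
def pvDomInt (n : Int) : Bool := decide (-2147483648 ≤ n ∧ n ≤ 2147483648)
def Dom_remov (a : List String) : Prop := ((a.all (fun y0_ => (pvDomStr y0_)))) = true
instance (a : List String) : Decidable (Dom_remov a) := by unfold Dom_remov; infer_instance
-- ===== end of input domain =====

-- B replaces A's slice/reverse/rescan/slice pipeline by one forward pass with a kept/buffer accumulator and a single final reverse.

-- '#' in x
def hasHash (x : String) : Bool := PySem.Str.isIn "#" x

-- ===== PORT A =====
-- A's "for i, x in enumerate(xs): if '#' in x: ind = i; break" with initial ind value `ind`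
def removFind (xs : List String) (i : Nat) (ind : Nat) : Nat :=
  match xs with
  | [] => ind
  | x :: r => if hasHash x then i else removFind r (i + 1) ind

def remov (a : List String) : List String :=
  let ind := removFind a 0 0
  let a1 := a.drop ind            -- a[ind:], exact: ind is a Nat index ≤ len
  let a2 := a1.reverse            -- a[::-1]
  let ind2 := removFind a2 0 ind
  a2.drop ind2                    -- a[ind:]

-- ===== PORT B =====
-- loop body of Source B: state (seen, kept, buf)
def removStep (st : Bool × List String × List String) (x : String) :
    Bool × List String × List String :=
  let (seen, kept, buf) := st
  if hasHash x then (true, kept ++ buf ++ [x], [])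
  else if seen then (seen, kept, buf ++ [x])
  else st

def remov_alt (a : List String) : List String :=
  let s := a.foldl removStep (false, [], [])
  if s.1 then s.2.1.reverse else a.reverse

-- ===== PRECONDITION & SPEC =====
def Spec_remov (a : List String) (out : List String) : Prop := out = remov_alt a
instance (a : List String) (out : List String) : Decidable (Spec_remov a out) := by unfold Spec_remov; infer_instance

-- ===== CLAIM (what is proved, stated in full; the proofs are below) =====
def Claim_equal_remov : Prop := ∀ (a : List String), Dom_remov a → Spec_remov a (remov a)

-- ===== LEMMAS AND PROOFS =====

theorem removFind_eq (xs : List String) (i ind : Nat) :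
    removFind xs i ind =
      match xs.findIdx? hasHash with
      | some j => i + j
      | none => ind := by
  induction xs generalizing i with
  | nil => simp [removFind]
  | cons x r ih =>
    simp only [removFind, List.findIdx?_cons]
    split_ifs with h
    · simp
    · rw [ih]
      cases hr : r.findIdx? hasHash with
      | none => simp
      | some v =>
        simp only [Option.map_some]
        rw [Nat.add_assoc, Nat.add_comm 1 v]

theorem rev_none (l : List String) (h : l.findIdx? hasHash = none) :
    l.reverse.findIdx? hasHash = none := by
  rw [List.findIdx?_eq_none_iff] at h ⊢
  intro x hx; exact h x (List.mem_reverse.mp hx)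

-- the first '#'-index is at most the last '#'-index
theorem first_le_last (l : List String) (k j : Nat)
    (hk : l.findIdx? hasHash = some k) (hj : l.reverse.findIdx? hasHash = some j) :
    k + j < l.length := by
  obtain ⟨hklt, -, hkmin⟩ := List.findIdx?_eq_some_iff_getElem.mp hk
  obtain ⟨hjlt, hpj, -⟩ := List.findIdx?_eq_some_iff_getElem.mp hj
  have hjl : j < l.length := by simpa using hjlt
  rw [List.getElem_reverse] at hpj
  by_contra hc
  have hlt : l.length - 1 - j < k := by omega
  exact hkmin _ hlt (by simpa using hpj)

-- A computes: full reverse if no '#', else the reversed block from first to last '#'-row.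
theorem remov_char (a : List String) :
    remov a =
      match a.findIdx? hasHash, a.reverse.findIdx? hasHash with
      | some k, some j => ((a.drop k).take (a.length - j - k)).reverse
      | _, _ => a.reverse := by
  cases h : a.findIdx? hasHash with
  | none =>
    have hrev := rev_none a h
    simp [remov, removFind_eq, h, hrev]
  | some k =>
    obtain ⟨hklt, hpk, -⟩ := List.findIdx?_eq_some_iff_getElem.mp h
    have h0 : 0 < (a.drop k).length := by simp; omega
    have hmem : a[k] ∈ (a.drop k).reverse := by
      rw [List.mem_reverse]
      have hm : (List.drop k a)[0]'h0 ∈ List.drop k a := List.getElem_mem h0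
      simpa using hm
    have hex : ∃ j, (a.drop k).reverse.findIdx? hasHash = some j := by
      cases hc : (a.drop k).reverse.findIdx? hasHash with
      | none => exact absurd (List.findIdx?_eq_none_iff.mp hc _ hmem) (by simp [hpk])
      | some j => exact ⟨j, rfl⟩
    obtain ⟨j, hj⟩ := hex
    have hjlt : j < (a.drop k).reverse.length :=
      (List.findIdx?_eq_some_iff_getElem.mp hj).1
    have hsplit : a.reverse = (a.drop k).reverse ++ (a.take k).reverse := by
      rw [← List.reverse_append, List.take_append_drop]
    have hrev : a.reverse.findIdx? hasHash = some j := by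
      rw [hsplit, List.findIdx?_append, hj]; rfl
    simp only [remov, removFind_eq, h, hj, hrev, Nat.zero_add]
    rw [List.drop_reverse, List.length_drop]
    have hjl : j < a.length - k := by simpa using hjlt
    rw [Nat.sub_right_comm]

-- invariant of B's fold
theorem fold_inv (l : List String) :
    l.foldl removStep (false, [], []) =
      match l.findIdx? hasHash, l.reverse.findIdx? hasHash with
      | some k, some j => (true, (l.drop k).take (l.length - j - k), l.drop (l.length - j))
      | _, _ => (false, [], []) := by
  induction l using List.reverseRecOn with
  | nil => rfl
  | append_singleton l x ih =>
    rw [List.foldl_append, List.foldl_cons, List.foldl_nil, ih]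
    by_cases hx : hasHash x
    · have hrev : (l ++ [x]).reverse.findIdx? hasHash = some 0 := by
        simp [List.reverse_append, List.findIdx?_cons, hx]
      cases hk : l.findIdx? hasHash with
      | none =>
        have hlr := rev_none l hk
        have hnew : (l ++ [x]).findIdx? hasHash = some l.length := by
          rw [List.findIdx?_append, hk]
          simp [List.findIdx?_cons, hx]
        simp only [hnew, hrev]
        simp [removStep, hx]
      | some k =>
        obtain ⟨j, hj⟩ : ∃ j, l.reverse.findIdx? hasHash = some j := by
          cases hc : l.reverse.findIdx? hasHash with
          | none =>
            rw [List.findIdx?_eq_none_iff] at hc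
            obtain ⟨hklt, hpk, -⟩ := List.findIdx?_eq_some_iff_getElem.mp hk
            exact absurd (hc _ (List.mem_reverse.mpr (l.getElem_mem hklt))) (by simp [hpk])
          | some j => exact ⟨j, rfl⟩
        have hkl := (List.findIdx?_eq_some_iff_getElem.mp hk).1
        have hkj := first_le_last l k j hk hj
        have hnew : (l ++ [x]).findIdx? hasHash = some k := by
          rw [List.findIdx?_append, hk]; rfl
        simp only [hj, hnew, hrev]
        simp only [removStep, hx, if_true]
        have hlen : (l ++ [x]).length = l.length + 1 := by simp
        simp only [Prod.mk.injEq, true_and]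
        constructor
        · -- kept ++ buf ++ [x] = ((l++[x]).drop k).take (l.length + 1 - 0 - k)
          have hb : l.drop (l.length - j) = (l.drop k).drop (l.length - j - k) := by
            rw [List.drop_drop]
            congr 1
            omega
          rw [List.drop_append_of_le_length (le_of_lt hkl)]
          rw [hb, List.take_append_drop]
          rw [List.take_of_length_le (by simp; omega)]
        · rw [hlen]
          simp
    · have hxs : ([x].findIdx? hasHash) = none := by simp [List.findIdx?_cons, hx]
      have hrevstep : (l ++ [x]).reverse.findIdx? hasHash
          = (l.reverse.findIdx? hasHash).map (· + 1) := by
        simp [List.reverse_append, List.findIdx?_cons, hx]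
      cases hk : l.findIdx? hasHash with
      | none =>
        have hlr := rev_none l hk
        have hnew : (l ++ [x]).findIdx? hasHash = none := by
          rw [List.findIdx?_append, hk, hxs]; rfl
        simp only [hnew]
        simp [removStep, hx]
      | some k =>
        obtain ⟨j, hj⟩ : ∃ j, l.reverse.findIdx? hasHash = some j := by
          cases hc : l.reverse.findIdx? hasHash with
          | none =>
            rw [List.findIdx?_eq_none_iff] at hc
            obtain ⟨hklt, hpk, -⟩ := List.findIdx?_eq_some_iff_getElem.mp hk
            exact absurd (hc _ (List.mem_reverse.mpr (l.getElem_mem hklt))) (by simp [hpk])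
          | some j => exact ⟨j, rfl⟩
        have hkl := (List.findIdx?_eq_some_iff_getElem.mp hk).1
        have hkj := first_le_last l k j hk hj
        have hnew : (l ++ [x]).findIdx? hasHash = some k := by
          rw [List.findIdx?_append, hk]; rfl
        have hnewr : (l ++ [x]).reverse.findIdx? hasHash = some (j + 1) := by
          rw [hrevstep, hj]; rfl
        simp only [hj, hnew, hnewr]
        simp only [removStep, hx, if_false, Bool.false_eq_true, if_true]
        have hlen : (l ++ [x]).length = l.length + 1 := by simp
        simp only [Prod.mk.injEq, true_and]
        constructor
        · rw [hlen]
          have : l.length + 1 - (j + 1) - k = l.length - j - k := by omega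
          rw [this, List.drop_append_of_le_length (by omega),
              List.take_append_of_le_length (by simp; omega)]
        · rw [hlen]
          have : l.length + 1 - (j + 1) = l.length - j := by omega
          rw [this, List.drop_append_of_le_length (by omega)]

theorem remov_eq_alt (a : List String) : remov a = remov_alt a := by
  rw [remov_char]
  simp only [remov_alt, fold_inv a]
  cases h1 : a.findIdx? hasHash <;> cases h2 : a.reverse.findIdx? hasHash <;> simp

-- ===== VERDICT (by name: the statement is the Claim_ definition above) =====
theorem remov_spec : Claim_equal_remov := by
  intro a _
  unfold Spec_remov
  exact remov_eq_alt a
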